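-- pv_equiv track=rewrite | github.com/NimishNatani/Crypto_Trading_Bot | utils/performance_calculator.py | _calculate_consecutive_sequences
-- ===== SOURCE A (Python) =====
-- from typing import Dict, List
--
-- def _calculate_consecutive_sequences(trades: List, winning: bool) -> List[int]:
--     """Calculate consecutive winning or losing streaks"""
--     sequences = []
--     current_streak = 0
--
--     for trade in trades:
--         is_winner = trade['profit_loss'] > 0
--
--         if (winning and is_winner) or (not winning and not is_winner):
--             current_streak += 1
--         else:
--             if current_streak > 0:
--                 sequences.append(current_streak)
--             current_streak = 0
--
--     # Add final streak if exists
--     if current_streak > 0: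
--         sequences.append(current_streak)
--
--     return sequences
-- ===== SOURCE B (Python) =====
-- from itertools import groupby
-- from typing import List
--
--
-- def _calculate_consecutive_sequences(trades: List, winning: bool) -> List[int]:
--     """Calculate consecutive winning or losing streaks via groupby."""
--     flags = (trade['profit_loss'] > 0 for trade in trades)
--     return [sum(1 for _ in group)
--             for key, group in groupby(flags)
--             if key == winning]
-- ===== Notes on version B (the rewrite author's own statement) =====
-- stated objective: idiomatic
-- what changed: Replaces the manual current_streak accumulator and its end-of-loop flush with itertools.groupby over the win/loss flag sequence, keeping only groups whose key matches `winning`.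
import Mathlib
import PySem

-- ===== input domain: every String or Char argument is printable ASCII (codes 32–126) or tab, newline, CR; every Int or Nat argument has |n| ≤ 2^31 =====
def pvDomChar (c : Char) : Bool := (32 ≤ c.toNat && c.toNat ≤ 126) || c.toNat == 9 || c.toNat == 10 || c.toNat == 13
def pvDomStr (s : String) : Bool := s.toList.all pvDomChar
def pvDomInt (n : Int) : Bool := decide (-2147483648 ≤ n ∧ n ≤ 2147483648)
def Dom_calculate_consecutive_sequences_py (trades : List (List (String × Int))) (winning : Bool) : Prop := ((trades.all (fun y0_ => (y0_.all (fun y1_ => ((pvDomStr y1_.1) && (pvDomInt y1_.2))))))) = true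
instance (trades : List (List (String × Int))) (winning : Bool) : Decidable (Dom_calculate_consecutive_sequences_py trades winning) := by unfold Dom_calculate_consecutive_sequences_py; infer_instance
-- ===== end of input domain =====

-- B replaces A's manual current_streak accumulator and end-of-loop flush by grouping the
-- win/loss flag sequence into maximal runs (itertools.groupby) and keeping matching runs (objective: idiomatic).

-- trade['profit_loss']: first-match association-list lookup; missing key = Python KeyError,
-- excluded by Pre_; `.getD 0` is a total stand-in used only outside Pre_.
def pvPL (t : List (String × Int)) : Int := ((PySem.Dict.mk t).get? "profit_loss").getD 0

-- ===== PORT A =====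
def calculate_consecutive_sequences_py (trades : List (List (String × Int))) (winning : Bool) : List Int :=
  let r := trades.foldl (fun (st : List Int × Int) trade =>
    let is_winner : Bool := decide (pvPL trade > 0)
    if (winning && is_winner) || (!winning && !is_winner) then (st.1, st.2 + 1)
    else (if st.2 > 0 then st.1 ++ [st.2] else st.1, 0)) ([], 0)
  if r.2 > 0 then r.1 ++ [r.2] else r.1

-- ===== PORT B =====
-- itertools.groupby over the flag stream: maximal runs of equal flags, forward.
def pvGroups : List Bool → List (Bool × Nat)
  | [] => []
  | b :: xs =>
    (b, (xs.takeWhile (fun x => x == b)).length + 1) :: pvGroups (xs.dropWhile (fun x => x == b))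
termination_by fs => fs.length
decreasing_by
  exact Nat.lt_succ_of_le (List.length_dropWhile_le _ _)

def calculate_consecutive_sequences_py_alt (trades : List (List (String × Int))) (winning : Bool) : List Int :=
  let flags := trades.map (fun trade => decide (pvPL trade > 0))
  ((pvGroups flags).filter (fun g => g.1 == winning)).map (fun g => ((g.2 : Nat) : Int))

-- ===== PRECONDITION & SPEC =====
-- Pre_ excludes trades missing the 'profit_loss' key, on which Python A raises KeyError (B raises too).
def Pre_calculate_consecutive_sequences_py (trades : List (List (String × Int))) (winning : Bool) : Prop :=
  ∀ t ∈ trades, "profit_loss" ∈ t.map Prod.fst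
instance (trades : List (List (String × Int))) (winning : Bool) : Decidable (Pre_calculate_consecutive_sequences_py trades winning) := by unfold Pre_calculate_consecutive_sequences_py; infer_instance

def pvWitness_calculate_consecutive_sequences_py : (List (List (String × Int))) × Bool :=
  ([[("profit_loss", 3)], [("profit_loss", -1)], [("profit_loss", 2)]], true)

def Spec_calculate_consecutive_sequences_py (trades : List (List (String × Int))) (winning : Bool) (out : List Int) : Prop := out = calculate_consecutive_sequences_py_alt trades winning
instance (trades : List (List (String × Int))) (winning : Bool) (out : List Int) : Decidable (Spec_calculate_consecutive_sequences_py trades winning out) := by unfold Spec_calculate_consecutive_sequences_py; infer_instance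

-- ===== CLAIM (what is proved, stated in full; the proofs are below) =====
def Claim_equal_calculate_consecutive_sequences_py : Prop := ∀ (trades : List (List (String × Int))) (winning : Bool), Dom_calculate_consecutive_sequences_py trades winning → Pre_calculate_consecutive_sequences_py trades winning → Spec_calculate_consecutive_sequences_py trades winning (calculate_consecutive_sequences_py trades winning)

-- ===== LEMMAS AND PROOFS =====

theorem pvGroups_nil : pvGroups [] = [] := by rw [pvGroups.eq_def]

theorem pvGroups_cons (b : Bool) (xs : List Bool) :
    pvGroups (b :: xs) =
      (b, (xs.takeWhile (fun x => x == b)).length + 1) :: pvGroups (xs.dropWhile (fun x => x == b)) := by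
  rw [pvGroups.eq_def]

-- A's loop, abstracted to the flag sequence with a Nat streak counter.
def pvH (w : Bool) : List Bool → Nat → List Int
  | [], c => if 0 < c then [((c : Nat) : Int)] else []
  | b :: bs, c => if b == w then pvH w bs (c + 1)
                  else (if 0 < c then [((c : Nat) : Int)] else []) ++ pvH w bs 0

-- B's result on a flag sequence.
def pvG (w : Bool) (fs : List Bool) : List Int :=
  ((pvGroups fs).filter (fun g => g.1 == w)).map (fun g => ((g.2 : Nat) : Int))

theorem pvCond_eq (w b : Bool) : ((w && b) || (!w && !b)) = (b == w) := by
  cases w <;> cases b <;> rfl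

theorem pvA_eq_h (w : Bool) (ts : List (List (String × Int))) (seqs : List Int) (c : Nat) :
    (if (ts.foldl (fun (st : List Int × Int) trade =>
          let is_winner : Bool := decide (pvPL trade > 0)
          if (w && is_winner) || (!w && !is_winner) then (st.1, st.2 + 1)
          else (if st.2 > 0 then st.1 ++ [st.2] else st.1, 0)) (seqs, (c : Int))).2 > 0
     then (ts.foldl (fun (st : List Int × Int) trade =>
          let is_winner : Bool := decide (pvPL trade > 0)
          if (w && is_winner) || (!w && !is_winner) then (st.1, st.2 + 1)
          else (if st.2 > 0 then st.1 ++ [st.2] else st.1, 0)) (seqs, (c : Int))).1 ++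
          [(ts.foldl (fun (st : List Int × Int) trade =>
          let is_winner : Bool := decide (pvPL trade > 0)
          if (w && is_winner) || (!w && !is_winner) then (st.1, st.2 + 1)
          else (if st.2 > 0 then st.1 ++ [st.2] else st.1, 0)) (seqs, (c : Int))).2]
     else (ts.foldl (fun (st : List Int × Int) trade =>
          let is_winner : Bool := decide (pvPL trade > 0)
          if (w && is_winner) || (!w && !is_winner) then (st.1, st.2 + 1)
          else (if st.2 > 0 then st.1 ++ [st.2] else st.1, 0)) (seqs, (c : Int))).1)
    = seqs ++ pvH w (ts.map (fun trade => decide (pvPL trade > 0))) c := by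
  induction ts generalizing seqs c with
  | nil =>
    simp only [List.foldl_nil, List.map_nil, pvH]
    by_cases hc : 0 < c
    · have hc' : ((c : Int) > 0) := by exact_mod_cast hc
      simp [hc, hc']
    · have hc' : ¬ ((c : Int) > 0) := by exact_mod_cast hc
      simp [hc, hc']
  | cons t ts ih =>
    rw [List.map_cons, List.foldl_cons]
    cases hb : (decide (pvPL t > 0) == w) with
    | true =>
      have hstep : (let is_winner : Bool := decide (pvPL t > 0)
          if (w && is_winner) || (!w && !is_winner) then ((seqs, (c : Int)).1, (seqs, (c : Int)).2 + 1)
          else (if (seqs, (c : Int)).2 > 0 then (seqs, (c : Int)).1 ++ [(seqs, (c : Int)).2] else (seqs, (c : Int)).1, 0))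
          = (seqs, ((c + 1 : Nat) : Int)) := by
        simp only [pvCond_eq, hb, if_true]
        push_cast
        rfl
      rw [hstep, ih]
      simp [pvH, hb]
    | false =>
      by_cases hc : 0 < c
      · have hc' : ((c : Int) > 0) := by exact_mod_cast hc
        have hstep : (let is_winner : Bool := decide (pvPL t > 0)
          if (w && is_winner) || (!w && !is_winner) then ((seqs, (c : Int)).1, (seqs, (c : Int)).2 + 1)
          else (if (seqs, (c : Int)).2 > 0 then (seqs, (c : Int)).1 ++ [(seqs, (c : Int)).2] else (seqs, (c : Int)).1, 0))
          = (seqs ++ [(c : Int)], ((0 : Nat) : Int)) := by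
          simp only [pvCond_eq, hb, Bool.false_eq_true, if_false, hc', if_pos hc']
          rfl
        rw [hstep, ih]
        simp [pvH, hb, hc, List.append_assoc]
      · have hc' : ¬ ((c : Int) > 0) := by exact_mod_cast hc
        have hstep : (let is_winner : Bool := decide (pvPL t > 0)
          if (w && is_winner) || (!w && !is_winner) then ((seqs, (c : Int)).1, (seqs, (c : Int)).2 + 1)
          else (if (seqs, (c : Int)).2 > 0 then (seqs, (c : Int)).1 ++ [(seqs, (c : Int)).2] else (seqs, (c : Int)).1, 0))
          = (seqs, ((0 : Nat) : Int)) := by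
          simp only [pvCond_eq, hb, Bool.false_eq_true, if_false, if_neg hc']
          rfl
        rw [hstep, ih]
        simp [pvH, hb, hc]

theorem pv_takeWhile_rep (w b : Bool) (hb : (b == w) = false) (k : Nat) (xs : List Bool) :
    (List.replicate k w ++ b :: xs).takeWhile (fun x => x == w) = List.replicate k w ∧
    (List.replicate k w ++ b :: xs).dropWhile (fun x => x == w) = b :: xs := by
  induction k with
  | zero => simp [hb]
  | succ k ih => simp [List.replicate_succ, ih.1, ih.2]

theorem pv_rep_only (w : Bool) (k : Nat) :
    (List.replicate k w).takeWhile (fun x => x == w) = List.replicate k w ∧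
    (List.replicate k w).dropWhile (fun x => x == w) = [] := by
  induction k with
  | zero => simp
  | succ k ih => simp [List.replicate_succ, ih.1, ih.2]

theorem pvG_rep (w : Bool) (c : Nat) :
    pvG w (List.replicate c w) = if 0 < c then [((c : Nat) : Int)] else [] := by
  cases c with
  | zero => simp [pvG, pvGroups_nil]
  | succ k =>
    have h := pv_rep_only w k
    simp only [pvG, List.replicate_succ, pvGroups_cons, h.1, h.2, pvGroups_nil]
    simp

-- dropping a maximal run of a non-matching flag does not change B's result
theorem pvG_skip_head (w b : Bool) (hb : (b == w) = false) (xs : List Bool) :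
    pvG w (b :: xs) = pvG w (xs.dropWhile (fun x => x == b)) := by
  simp only [pvG, pvGroups_cons]
  simp [hb]

theorem pvG_dropWhile (w : Bool) (n : Nat) :
    ∀ xs : List Bool, xs.length ≤ n → ∀ b : Bool, (b == w) = false →
      pvG w (xs.dropWhile (fun x => x == b)) = pvG w xs := by
  induction n with
  | zero =>
    intro xs hxs b hb
    have : xs = [] := List.eq_nil_of_length_eq_zero (Nat.le_zero.mp hxs)
    simp [this]
  | succ n ih =>
    intro xs hxs b hb
    cases xs with
    | nil => simp
    | cons c xs' =>
      simp only [List.length_cons, Nat.succ_le_succ_iff] at hxs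
      cases hc : (c == b) with
      | true =>
        have hcb : c = b := (beq_iff_eq).mp hc
        simp only [List.dropWhile_cons, hc, if_true]
        rw [ih xs' hxs b hb, hcb, pvG_skip_head w b hb xs']
        exact (ih xs' hxs b hb).symm
      | false =>
        simp [hc]

theorem pvG_cons_ne (w b : Bool) (hb : (b == w) = false) (xs : List Bool) :
    pvG w (b :: xs) = pvG w xs := by
  rw [pvG_skip_head w b hb xs]
  exact pvG_dropWhile w xs.length xs (le_refl _) b hb

theorem pvG_rep_ne (w b : Bool) (hb : (b == w) = false) (c : Nat) (xs : List Bool) :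
    pvG w (List.replicate c w ++ b :: xs) =
      (if 0 < c then [((c : Nat) : Int)] else []) ++ pvG w (b :: xs) := by
  cases c with
  | zero => simp
  | succ k =>
    have h := pv_takeWhile_rep w b hb k xs
    simp only [List.replicate_succ, List.cons_append, pvG, pvGroups_cons, h.1, h.2]
    simp

theorem pvH_eq_G (w : Bool) (fs : List Bool) :
    ∀ c : Nat, pvH w fs c = pvG w (List.replicate c w ++ fs) := by
  induction fs with
  | nil =>
    intro c
    simp only [pvH, List.append_nil]
    rw [pvG_rep]
  | cons b bs ih =>
    intro c
    cases hb : (b == w) with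
    | true =>
      have hbw : b = w := (beq_iff_eq).mp hb
      simp only [pvH, hb, if_true]
      rw [ih (c + 1)]
      congr 1
      rw [hbw, List.replicate_succ']
      simp [List.append_assoc]
    | false =>
      simp only [pvH, hb, Bool.false_eq_true, if_false]
      rw [ih 0, pvG_rep_ne w b hb c bs, pvG_cons_ne w b hb bs]
      simp

-- ===== VERDICT (by name: the statement is the Claim_ definition above) =====
theorem calculate_consecutive_sequences_py_spec : Claim_equal_calculate_consecutive_sequences_py := by
  intro trades winning _ _
  show calculate_consecutive_sequences_py trades winning = calculate_consecutive_sequences_py_alt trades winning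
  unfold calculate_consecutive_sequences_py calculate_consecutive_sequences_py_alt
  have h := pvA_eq_h winning trades [] 0
  simp only [Nat.cast_zero] at h
  rw [h, pvH_eq_G]
  simp [pvG]
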